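-- pv_equiv track=rewrite | github.com/DrSlink/bioinformatics | skoltech_final/ORFanalysis.py | find_operons
-- ===== SOURCE A (Python) =====
-- def find_operons(segments: set):
--     segments = sorted(segments)
--     result = []
--     for i in range(len(segments) - 1):
--         j = i + 1
--         if segments[i][2] == segments[j][2] and segments[i][1] + 150 >= segments[j][0]:
--             segments[j] = (segments[i][0], segments[j][1], segments[j][2])
--         else:
--             result.append(segments[i])
--     result.append(segments[-1])
--     return set(result)
-- ===== SOURCE B (Python) =====
-- def find_operons(segments: set):
--     segs = sorted(segments)
--     return set(_operons(segs))
--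
--
-- def _operons(segs):
--     # divide and conquer: operons of each half, joined at the boundary
--     if len(segs) <= 1:
--         return list(segs)
--     mid = len(segs) // 2
--     return _combine(_operons(segs[:mid]), _operons(segs[mid:]))
--
--
-- def _combine(left, right):
--     if left and right:
--         a, b = left[-1], right[0]
--         if a[2] == b[2] and a[1] + 150 >= b[0]:
--             return left[:-1] + [(a[0], b[1], b[2])] + right[1:]
--     return left + right
-- ===== Notes on version B (the rewrite author's own statement) =====
-- stated objective: alternative
-- what changed: Replaces A's index loop that mutates the sorted list in place (rewriting segments[j] to carry the merged start forward) with a divide-and-conquer recursion: the operon lists of the two halves of the sorted list are computed recursively and joined by merging at most the last left operon with the first right operon at the boundary.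
import Mathlib
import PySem

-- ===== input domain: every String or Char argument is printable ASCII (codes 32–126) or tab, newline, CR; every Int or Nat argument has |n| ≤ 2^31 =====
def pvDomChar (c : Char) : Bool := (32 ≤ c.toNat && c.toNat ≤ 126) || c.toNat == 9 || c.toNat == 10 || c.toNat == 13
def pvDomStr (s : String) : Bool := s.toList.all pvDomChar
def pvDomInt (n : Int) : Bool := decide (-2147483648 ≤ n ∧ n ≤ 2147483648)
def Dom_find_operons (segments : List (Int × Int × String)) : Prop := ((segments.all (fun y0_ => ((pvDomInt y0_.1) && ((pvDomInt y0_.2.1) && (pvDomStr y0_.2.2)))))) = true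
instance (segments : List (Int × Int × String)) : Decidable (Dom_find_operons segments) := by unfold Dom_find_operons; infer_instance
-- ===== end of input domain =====

-- B replaces A's in-place index loop with a divide-and-conquer recursion joining the
-- operon lists of the two halves at the boundary (alternative decomposition, same cost);
-- equivalence is claimed on nonempty input (A raises IndexError on the empty set).

-- ===== PORT A =====
-- Python tuple comparison on (int, int, str) is lexicographic; exact per the PYSEM
-- str-comparison note (Python's s < t on str is '<' on s.toList, code-point order).
def pyLt3 (a b : Int × Int × String) : Bool :=
  decide (a.1 < b.1) || (a.1 == b.1 &&
    (decide (a.2.1 < b.2.1) || (a.2.1 == b.2.1 && PySem.Chars.strLt a.2.2.toList b.2.2.toList)))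

-- sorted(segments): PySem.List.sorted is exactly this foldl of insertBy
-- (PySem.List.sorted_eq_foldl_insertBy); written out because the key here is a
-- 3-tuple, whose Python '<' is pyLt3 above.  Both Pythons call sorted identically.
def sortSegs (xs : List (Int × Int × String)) : List (Int × Int × String) :=
  xs.foldl (fun acc x => PySem.List.insertBy pyLt3 x acc) []

-- one iteration of A's 'for i in range(len(segments) - 1)' body; state = (segments, result)
def stepA (st : List (Int × Int × String) × List (Int × Int × String)) (i : Int) :
    List (Int × Int × String) × List (Int × Int × String) :=
  let j := i + 1
  let si := PySem.List.pyGetD st.1 i (0, 0, "")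
  let sj := PySem.List.pyGetD st.1 j (0, 0, "")
  if si.2.2 == sj.2.2 && decide (sj.1 ≤ si.2.1 + 150) then
    (PySem.List.pySetD st.1 j (si.1, sj.2.1, sj.2.2), st.2)
  else
    (st.1, st.2 ++ [si])

def find_operons (segments : List (Int × Int × String)) : List (Int × Int × String) :=
  let segs := sortSegs segments
  let st := (PySem.List.pyRange 0 ((segs.length : Int) - 1) 1).foldl stepA (segs, [])
  PySem.Set.ofList (st.2 ++ [PySem.List.pyGetD st.1 (-1) (0, 0, "")])

-- ===== PORT B =====
-- _combine(left, right): join two operon lists, merging at most at the boundary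
def combineRuns (L R : List (Int × Int × String)) : List (Int × Int × String) :=
  match L.getLast?, R with
  | some a, b :: bs =>
    if a.2.2 == b.2.2 && decide (b.1 ≤ a.2.1 + 150) then
      L.dropLast ++ (a.1, b.2.1, b.2.2) :: bs
    else L ++ R
  | _, _ => L ++ R

-- _operons(segs): divide and conquer on the sorted list
def dcMerge (xs : List (Int × Int × String)) : List (Int × Int × String) :=
  if h : xs.length ≤ 1 then xs
  else
    combineRuns (dcMerge (xs.take (xs.length / 2))) (dcMerge (xs.drop (xs.length / 2)))
termination_by xs.length
decreasing_by
  · simp only [List.length_take]; omega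
  · simp only [List.length_drop]; omega

def find_operons_alt (segments : List (Int × Int × String)) : List (Int × Int × String) :=
  PySem.Set.ofList (dcMerge (sortSegs segments))

-- ===== PRECONDITION & SPEC =====
-- Pre_ excludes only the empty list, on which A raises IndexError at segments[-1].
def Pre_find_operons (segments : List (Int × Int × String)) : Prop := segments ≠ []
instance (segments : List (Int × Int × String)) : Decidable (Pre_find_operons segments) := by
  unfold Pre_find_operons; infer_instance

def pvWitness_find_operons : (List (Int × Int × String)) := [(0, 10, "+")]

def Spec_find_operons (segments : List (Int × Int × String)) (out : List (Int × Int × String)) : Prop :=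
  out = find_operons_alt segments
instance (segments : List (Int × Int × String)) (out : List (Int × Int × String)) : Decidable (Spec_find_operons segments out) := by
  unfold Spec_find_operons; infer_instance

-- ===== CLAIM (what is proved, stated in full; the proofs are below) =====
def Claim_equal_find_operons : Prop := ∀ (segments : List (Int × Int × String)), Dom_find_operons segments → Pre_find_operons segments → Spec_find_operons segments (find_operons segments)

-- ===== LEMMAS AND PROOFS =====

-- the common description of both programs: fold the sorted tail carrying the current
-- merged segment; emit it when the run breaks.
def mergeRec : (Int × Int × String) → List (Int × Int × String) → List (Int × Int × String)
  | cur, [] => [cur]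
  | cur, x :: xs =>
    if cur.2.2 == x.2.2 && decide (x.1 ≤ cur.2.1 + 150) then
      mergeRec (cur.1, x.2.1, x.2.2) xs
    else
      cur :: mergeRec x xs

-- ops: the operon list of a (sorted) segment list
def ops : List (Int × Int × String) → List (Int × Int × String)
  | [] => []
  | h :: t => mergeRec h t

theorem sortSegs_ne_nil (xs : List (Int × Int × String)) (h : xs ≠ []) : sortSegs xs ≠ [] := by
  obtain h' | ⟨l, y, rfl⟩ := xs.eq_nil_or_concat
  · exact absurd h' h
  · unfold sortSegs
    rw [List.concat_eq_append, List.foldl_append]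
    intro hnil
    have hm : y ∈ PySem.List.insertBy pyLt3 y
        (l.foldl (fun acc x => PySem.List.insertBy pyLt3 x acc) []) := by
      rw [PySem.List.mem_insertBy]; left; rfl
    simp only [List.foldl_cons, List.foldl_nil] at hnil
    rw [hnil] at hm
    exact absurd hm (List.not_mem_nil)

theorem A_loop (rest p : List (Int × Int × String)) (cur : Int × Int × String)
    (acc : List (Int × Int × String)) :
    (((PySem.List.pyRange (p.length : Int) ((p.length : Int) + rest.length) 1).foldl stepA
        (p ++ cur :: rest, acc)).2 ++
      [PySem.List.pyGetD
        ((PySem.List.pyRange (p.length : Int) ((p.length : Int) + rest.length) 1).foldl stepA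
          (p ++ cur :: rest, acc)).1 (-1) (0, 0, "")]) =
    acc ++ mergeRec cur rest := by
  induction rest generalizing p cur acc with
  | nil =>
      rw [show ((p.length : Int) + ([] : List (Int × Int × String)).length) = (p.length : Int) by simp,
        PySem.List.pyRange_one_eq_nil le_rfl]
      simp [List.foldl, mergeRec, PySem.List.pyGetD_neg_one_append_singleton]
  | cons x xs ih =>
      have hlt : (p.length : Int) < (p.length : Int) + ((x :: xs : List (Int × Int × String)).length : Int) := by
        simp
      rw [PySem.List.pyRange_one_cons hlt, List.foldl_cons]
      have hsi : PySem.List.pyGetD (p ++ cur :: x :: xs) (p.length : Int) (0, 0, "") = cur := by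
        rw [PySem.List.pyGetD_natCast]
        simp [List.getD]
      have hsj : PySem.List.pyGetD (p ++ cur :: x :: xs) ((p.length : Int) + 1) (0, 0, "") = x := by
        rw [show ((p.length : Int) + 1) = ((p.length + 1 : Nat) : Int) by omega,
          PySem.List.pyGetD_natCast]
        simp [List.getD]
      have hb : ((p.length : Int) + 1) = (((p ++ [cur]).length : Int)) := by simp
      have hb2 : ((p.length : Int) + ((x :: xs : List (Int × Int × String)).length : Int)) =
          (((p ++ [cur]).length : Int) + (xs.length : Int)) := by
        simp; ring
      by_cases hc : (cur.2.2 == x.2.2 && decide (x.1 ≤ cur.2.1 + 150)) = true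
      · have hset : PySem.List.pySetD (p ++ cur :: x :: xs) ((p.length : Int) + 1)
            (cur.1, x.2.1, x.2.2) = (p ++ [cur]) ++ (cur.1, x.2.1, x.2.2) :: xs := by
          rw [show ((p.length : Int) + 1) = ((p.length + 1 : Nat) : Int) by omega,
            PySem.List.pySetD_natCast]
          rw [List.set_append_right _ _ (Nat.le_succ_of_le (le_refl p.length))]
          simp
        have hstep : stepA (p ++ cur :: x :: xs, acc) (p.length : Int) =
            ((p ++ [cur]) ++ (cur.1, x.2.1, x.2.2) :: xs, acc) := by
          simp only [stepA, hsi, hsj]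
          rw [if_pos hc, hset]
        rw [hstep, hb, hb2, ih (p ++ [cur]) (cur.1, x.2.1, x.2.2) acc]
        simp only [mergeRec]
        rw [if_pos hc]
      · have hstep : stepA (p ++ cur :: x :: xs, acc) (p.length : Int) =
            ((p ++ [cur]) ++ x :: xs, acc ++ [cur]) := by
          simp only [stepA, hsi, hsj]
          rw [if_neg hc]
          simp
        rw [hstep, hb, hb2, ih (p ++ [cur]) x (acc ++ [cur])]
        simp only [mergeRec]
        rw [if_neg hc, List.append_assoc]
        simp

theorem mergeRec_ne_nil (t : List (Int × Int × String)) (c : Int × Int × String) :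
    mergeRec c t ≠ [] := by
  induction t generalizing c with
  | nil => simp [mergeRec]
  | cons x xs ih =>
      simp only [mergeRec]
      split
      · exact ih _
      · simp

-- the head of a run keeps the carried start and the (constant-within-run) strand
theorem mergeRec_head (t : List (Int × Int × String)) (c : Int × Int × String) :
    ∃ E r, mergeRec c t = (c.1, E, c.2.2) :: r := by
  induction t generalizing c with
  | nil => exact ⟨c.2.1, [], rfl⟩
  | cons x xs ih =>
      simp only [mergeRec]
      by_cases hc : (c.2.2 == x.2.2 && decide (x.1 ≤ c.2.1 + 150)) = true
      · rw [if_pos hc]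
        obtain ⟨E, r, hr⟩ := ih (c.1, x.2.1, x.2.2)
        have hst : c.2.2 = x.2.2 := by
          have := (Bool.and_eq_true ..).mp hc
          exact eq_of_beq this.1
        exact ⟨E, r, by rw [hr, hst]⟩
      · exact ⟨c.2.1, mergeRec x xs, by rw [if_neg hc]⟩

-- the carried start only affects the head's first component
theorem mergeRec_start (t : List (Int × Int × String)) (e : Int) (st : String)
    (s s' : Int) (p : Int × String) (r : List (Int × Int × String))
    (h : mergeRec (s', e, st) t = (s', p) :: r) :
    mergeRec (s, e, st) t = (s, p) :: r := by
  induction t generalizing e st with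
  | nil =>
      simp only [mergeRec] at h ⊢
      obtain ⟨h1, h2⟩ := List.cons.injEq .. ▸ h
      rw [← h2]
      have : p = (e, st) := by
        have h' := congrArg Prod.snd h1; simpa using h'.symm
      rw [this]
  | cons x xs ih =>
      simp only [mergeRec] at h ⊢
      by_cases hc : (st == x.2.2 && decide (x.1 ≤ e + 150)) = true
      · rw [if_pos hc] at h ⊢
        exact ih _ _ h
      · rw [if_neg hc] at h ⊢
        obtain ⟨h1, h2⟩ := List.cons.injEq .. ▸ h
        have : p = (e, st) := by
          have h' := congrArg Prod.snd h1; simpa using h'.symm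
        rw [← h2, this]

theorem combineRuns_cons (a : Int × Int × String) (N M : List (Int × Int × String))
    (hN : N ≠ []) : combineRuns (a :: N) M = a :: combineRuns N M := by
  obtain ⟨n, ns, rfl⟩ := List.exists_cons_of_ne_nil hN
  cases M with
  | nil => simp [combineRuns]
  | cons b bs =>
      have hgl : (n :: ns).getLast? = some ((n :: ns).getLast (by simp)) :=
        List.getLast?_eq_some_getLast (by simp)
      simp only [combineRuns, List.getLast?_cons_cons, hgl]
      split_ifs
      · rw [List.dropLast_cons_of_ne_nil (by simp), List.cons_append]
      · simp

-- joining at the boundary computes the sequential run decomposition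
theorem ops_merge (t1 : List (Int × Int × String)) (h1 h2 : Int × Int × String)
    (t2 : List (Int × Int × String)) :
    mergeRec h1 (t1 ++ h2 :: t2) = combineRuns (mergeRec h1 t1) (mergeRec h2 t2) := by
  induction t1 generalizing h1 with
  | nil =>
      obtain ⟨E, r, hr⟩ := mergeRec_head t2 h2
      simp only [List.nil_append, mergeRec, hr]
      simp only [combineRuns, List.getLast?_singleton]
      have hm : mergeRec (h1.1, h2.2.1, h2.2.2) t2 = (h1.1, E, h2.2.2) :: r :=
        mergeRec_start t2 h2.2.1 h2.2.2 h1.1 h2.1 (E, h2.2.2) r hr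
      split_ifs <;> simp_all
  | cons x xs ih =>
      simp only [List.cons_append, mergeRec]
      by_cases hc : (h1.2.2 == x.2.2 && decide (x.1 ≤ h1.2.1 + 150)) = true
      · rw [if_pos hc, if_pos hc, ih]
      · rw [if_neg hc, if_neg hc, ih,
          combineRuns_cons h1 (mergeRec x xs) _ (mergeRec_ne_nil xs x)]

theorem combine_ops (l1 l2 : List (Int × Int × String)) :
    combineRuns (ops l1) (ops l2) = ops (l1 ++ l2) := by
  cases l1 with
  | nil =>
      simp only [ops, List.nil_append]
      cases hl : ops l2 <;> simp [combineRuns]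
  | cons h1 t1 =>
      cases l2 with
      | nil => simp [ops, combineRuns]
      | cons h2 t2 =>
          simp only [ops, List.cons_append]
          rw [ops_merge]

theorem dcMerge_eq_ops (xs : List (Int × Int × String)) : dcMerge xs = ops xs := by
  by_cases h : xs.length ≤ 1
  · rw [dcMerge, dif_pos h]
    match xs, h with
    | [], _ => rfl
    | [x], _ => rfl
  · rw [dcMerge, dif_neg h,
      dcMerge_eq_ops (xs.take (xs.length / 2)),
      dcMerge_eq_ops (xs.drop (xs.length / 2)),
      combine_ops, List.take_append_drop]
termination_by xs.length
decreasing_by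
  · simp only [List.length_take]; omega
  · simp only [List.length_drop]; omega

-- ===== VERDICT (by name: the statements are the Claim_ definitions above) =====
theorem find_operons_spec : Claim_equal_find_operons := by
  intro segments _ hpre
  unfold Spec_find_operons
  have hne : sortSegs segments ≠ [] := sortSegs_ne_nil segments hpre
  obtain ⟨h, t, hs⟩ := List.exists_cons_of_ne_nil hne
  simp only [find_operons, find_operons_alt, hs, dcMerge_eq_ops]
  congr 1
  have hb : (((h :: t : List (Int × Int × String)).length : Int)) - 1 =
      ((0 : Int) + (t.length : Int)) := by
    simp
  rw [hb]
  have hA := A_loop t [] h []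
  simp only [List.nil_append, List.length_nil, Nat.cast_zero] at hA
  rw [hA]
  rfl
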